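-- pv_equiv track=rewrite | github.com/dobrochna/python_Training | think_python.py | make_weights
-- ===== SOURCE A (Python) =====
-- def make_weights(hist):
--     start = 0
--     stop = 0
--     weights = {}
--     for word in hist:
--         stop += hist.get(word)
--         weights.update({word: str(start)+" "+str(stop)})
--         start = stop
--     return weights
-- ===== SOURCE B (Python) =====
-- def make_weights(hist):
--     items = list(hist.items())
--     vals = [v for _, v in items]
--     return {w: str(sum(vals[:i])) + " " + str(sum(vals[:i + 1]))
--             for i, (w, _) in enumerate(items)}
-- ===== Notes on version B (the rewrite author's own statement) =====
-- stated objective: alternative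
-- what changed: B keeps no running state at all: it materialises the item list once and computes each word's range independently as the sums of the value slices vals[:i] and vals[:i+1], trading A's single stateful start/stop loop for index-based closed-form slice sums (O(n^2)).
import Mathlib
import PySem

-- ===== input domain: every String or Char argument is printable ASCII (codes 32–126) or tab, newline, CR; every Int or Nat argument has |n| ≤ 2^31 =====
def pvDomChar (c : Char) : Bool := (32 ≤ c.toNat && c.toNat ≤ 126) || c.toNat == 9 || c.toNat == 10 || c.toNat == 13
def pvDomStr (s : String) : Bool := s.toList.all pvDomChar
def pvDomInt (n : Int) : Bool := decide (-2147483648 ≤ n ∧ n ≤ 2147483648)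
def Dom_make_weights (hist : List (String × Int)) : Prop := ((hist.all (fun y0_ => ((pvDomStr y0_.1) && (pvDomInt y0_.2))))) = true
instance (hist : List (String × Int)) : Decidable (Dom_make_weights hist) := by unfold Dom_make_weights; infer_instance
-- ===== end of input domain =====

-- B drops A's running start/stop state entirely: it computes each word's range independently
-- from index-based slice sums sum(vals[:i]) / sum(vals[:i+1]) (alternative decomposition, O(n^2)).

-- ===== PORT A =====
-- A's loop 'for word in hist' iterates the dict's keys; 'hist.get(word)' always finds the key
-- (word comes from hist), so getD's default 0 is never used.
def make_weights (hist : List (String × Int)) : List (String × String) :=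
  let d := PySem.Dict.ofList hist
  (d.keys.foldl
    (fun (st : Int × Int × PySem.Dict String String) word =>
      let stop := st.2.1 + d.getD word 0
      ((stop, stop,
        st.2.2.insert word (PySem.Int.toStr st.1 ++ " " ++ PySem.Int.toStr stop)) :
        Int × Int × PySem.Dict String String))
    (0, 0, PySem.Dict.empty)).2.2.items

-- ===== PORT B =====
-- list(hist.items()) → Dict.items; vals[:i] → PySem.List.slice vals none (some i);
-- enumerate(items) → PySem.List.enumerate items 0 (indices are Ints, as in Python).
def make_weights_alt (hist : List (String × Int)) : List (String × String) :=
  let items := (PySem.Dict.ofList hist).items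
  let vals := items.map Prod.snd
  (PySem.List.enumerate items 0).map (fun x =>
    (x.2.1,
      PySem.Int.toStr (PySem.List.slice vals none (some x.1)).sum ++ " " ++
      PySem.Int.toStr (PySem.List.slice vals none (some (x.1 + 1))).sum))

-- ===== PRECONDITION & SPEC =====
-- Pre_ excludes association lists with duplicate keys: the Python argument is a dict, whose keys are
-- necessarily unique, so no input A actually accepts is excluded.
def Pre_make_weights (hist : List (String × Int)) : Prop := (hist.map Prod.fst).Nodup
instance (hist : List (String × Int)) : Decidable (Pre_make_weights hist) := by unfold Pre_make_weights; infer_instance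
def pvWitness_make_weights : (List (String × Int)) := [("the", 2), ("cat", 1), ("sat", 3)]
def Spec_make_weights (hist : List (String × Int)) (out : List (String × String)) : Prop := out = make_weights_alt hist
instance (hist : List (String × Int)) (out : List (String × String)) : Decidable (Spec_make_weights hist out) := by unfold Spec_make_weights; infer_instance

-- ===== CLAIM (what is proved, stated in full; the proofs are below) =====
def Claim_equal_make_weights : Prop := ∀ (hist : List (String × Int)), Dom_make_weights hist → Pre_make_weights hist → Spec_make_weights hist (make_weights hist)

-- ===== LEMMAS AND PROOFS =====

-- the common shape of both results: word k gets the range "t  t+v" as t runs through the prefix sums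
def pvRanges (l : List (String × Int)) (t : Int) : List (String × String) :=
  match l with
  | [] => []
  | (k, v) :: r => (k, PySem.Int.toStr t ++ " " ++ PySem.Int.toStr (t + v)) :: pvRanges r (t + v)

theorem b_enum_eq (r : List (String × Int)) (pre : List (String × Int)) :
    (PySem.List.enumerate r ((pre.length : Nat) : Int)).map (fun x =>
      (x.2.1,
        PySem.Int.toStr (PySem.List.slice ((pre ++ r).map Prod.snd) none (some x.1)).sum ++ " " ++
        PySem.Int.toStr (PySem.List.slice ((pre ++ r).map Prod.snd) none (some (x.1 + 1))).sum))
      = pvRanges r ((pre.map Prod.snd).sum) := by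
  induction r generalizing pre with
  | nil => simp [PySem.List.enumerate_nil, pvRanges]
  | cons p r' ih =>
    obtain ⟨k, v⟩ := p
    rw [PySem.List.enumerate_cons, List.map_cons, pvRanges]
    refine congrArg₂ List.cons ?_ ?_
    · have h1 : ((pre ++ (k, v) :: r').map Prod.snd)
          = pre.map Prod.snd ++ v :: r'.map Prod.snd := by simp
      have hc : ((pre.length : Nat) : Int) + 1 = (((pre.length + 1 : Nat)) : Int) := by
        push_cast; ring
      rw [hc, PySem.List.slice_to_natCast, PySem.List.slice_to_natCast, h1,
        List.take_append, List.take_append]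
      have hA : (pre.map Prod.snd).length = pre.length := by simp
      have h2 : ∀ n, pre.length ≤ n → (pre.map Prod.snd).take n = pre.map Prod.snd :=
        fun n hn => List.take_of_length_le (by simpa using hn)
      rw [h2 _ (le_refl _), h2 _ (Nat.le_succ _)]
      simp [hA]
    · have := ih (pre ++ [(k, v)])
      have hc2 : (((pre ++ [(k, v)]).length : Nat) : Int) = ((pre.length : Nat) : Int) + 1 := by
        simp
      rw [hc2] at this
      rw [show pre ++ (k, v) :: r' = (pre ++ [(k, v)]) ++ r' by simp]
      rw [this]
      simp

theorem b_map_eq (l : List (String × Int)) :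
    (PySem.List.enumerate l 0).map (fun x =>
      (x.2.1,
        PySem.Int.toStr (PySem.List.slice (l.map Prod.snd) none (some x.1)).sum ++ " " ++
        PySem.Int.toStr (PySem.List.slice (l.map Prod.snd) none (some (x.1 + 1))).sum))
      = pvRanges l 0 := by
  have := b_enum_eq l []
  simpa using this

theorem a_fold_eq (l : List (String × Int)) (d : PySem.Dict String Int) (t : Int)
    (w : PySem.Dict String String)
    (hget : ∀ p ∈ l, d.getD p.1 0 = p.2)
    (hfresh : ∀ p ∈ l, w.contains p.1 = false)
    (hnd : (l.map Prod.fst).Nodup) :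
    ((l.map Prod.fst).foldl
      (fun (st : Int × Int × PySem.Dict String String) word =>
        let stop := st.2.1 + d.getD word 0
        ((stop, stop,
          st.2.2.insert word (PySem.Int.toStr st.1 ++ " " ++ PySem.Int.toStr stop)) :
          Int × Int × PySem.Dict String String))
      (t, t, w)).2.2.items = w.items ++ pvRanges l t := by
  induction l generalizing t w with
  | nil => simp [pvRanges]
  | cons p r ih =>
    obtain ⟨k, v⟩ := p
    have hv : d.getD k 0 = v := hget (k, v) (List.mem_cons_self ..)
    have hkw : w.contains k = false := hfresh (k, v) (List.mem_cons_self ..)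
    simp only [List.map_cons, List.foldl_cons, hv, pvRanges]
    have hnd' : (r.map Prod.fst).Nodup := (List.nodup_cons.mp hnd).2
    have hknotr : k ∉ r.map Prod.fst := (List.nodup_cons.mp hnd).1
    rw [ih (t + v) _ (fun q hq => hget q (List.mem_cons_of_mem _ hq))
      (fun q hq => by
        rw [PySem.Dict.contains_insert]
        have hqk : q.1 ≠ k := by
          intro he
          exact hknotr (he ▸ List.mem_map_of_mem hq)
        simp [hqk, hfresh q (List.mem_cons_of_mem _ hq)]) hnd']
    rw [PySem.Dict.items_insert_of_not_contains (h := hkw)]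
    simp

theorem items_ofList (hist : List (String × Int)) (hnd : (hist.map Prod.fst).Nodup) :
    (PySem.Dict.ofList hist).items = hist := by
  unfold PySem.Dict.ofList PySem.Dict.update
  rw [PySem.Dict.items_foldl_insert_fresh hist Prod.fst Prod.snd PySem.Dict.empty
    (fun a _ => PySem.Dict.contains_empty _) hnd]
  simp [PySem.Dict.empty]

-- ===== VERDICT (by name: the statement is the Claim_ definition above) =====
theorem make_weights_spec : Claim_equal_make_weights := by
  intro hist _ hpre
  unfold Spec_make_weights make_weights make_weights_alt
  have hitems : (PySem.Dict.ofList hist).items = hist := items_ofList hist hpre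
  have hkeys : (PySem.Dict.ofList hist).keys = hist.map Prod.fst := by
    simp [PySem.Dict.keys, hitems]
  have hndk : (PySem.Dict.ofList hist).keys.Nodup := by rw [hkeys]; exact hpre
  have hget : ∀ p ∈ hist, (PySem.Dict.ofList hist).getD p.1 0 = p.2 := by
    intro p hp
    obtain ⟨k, v⟩ := p
    exact PySem.Dict.getD_of_mem_items (PySem.Dict.ofList hist) (by rw [hitems]; exact hp) hndk 0
  simp only [hkeys, hitems]
  rw [a_fold_eq hist _ 0 PySem.Dict.empty hget
    (fun p _ => PySem.Dict.contains_empty _) hpre]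
  rw [b_map_eq]
  simp [PySem.Dict.empty]
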